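-- pv_equiv track=rewrite | github.com/Hyunoi/algo | 00001~10000/1891.py | findPiece
-- ===== SOURCE A (Python) =====
-- def findPiece(n, pieceNum):
--     x, y = 0, 0
--     for i in range(n):
--         n -= 1
--
--         # 2 사분면
--         if pieceNum[i] == "2":
--             pass
--         # 1 사분면
--         elif pieceNum[i] == "1":
--             x += (2**n)
--         # 3 사분면
--         elif pieceNum[i] == "3":
--             y += (2**n)
--         # 4 사분면
--         elif pieceNum[i] == "4":
--             x += (2**n)
--             y += (2**n)
--
--     return x, y
-- ===== SOURCE B (Python) =====
-- def findPiece(n, pieceNum):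
--     x, y = 0, 0
--     for i in range(n):
--         c = pieceNum[i]
--         x = x * 2 + (1 if c in "14" else 0)
--         y = y * 2 + (1 if c in "34" else 0)
--     return x, y
-- ===== Notes on version B (the rewrite author's own statement) =====
-- stated objective: simpler
-- what changed: Replaces the 4-way digit branch adding 2**n per position with Horner-style doubling accumulators (x = x*2 + bit) and two membership tests, eliminating bignum power computations.
import Mathlib
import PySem

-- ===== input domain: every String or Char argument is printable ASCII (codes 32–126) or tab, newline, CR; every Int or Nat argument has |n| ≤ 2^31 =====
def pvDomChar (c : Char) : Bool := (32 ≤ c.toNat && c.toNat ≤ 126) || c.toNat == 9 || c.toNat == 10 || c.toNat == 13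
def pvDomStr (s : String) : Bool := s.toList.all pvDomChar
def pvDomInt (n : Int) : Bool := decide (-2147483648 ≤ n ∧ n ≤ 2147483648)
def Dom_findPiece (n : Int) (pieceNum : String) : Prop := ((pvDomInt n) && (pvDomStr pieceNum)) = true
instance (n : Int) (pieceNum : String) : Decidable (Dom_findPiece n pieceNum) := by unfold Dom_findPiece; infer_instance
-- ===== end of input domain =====

-- B replaces the per-digit 2**n additions with Horner doubling accumulators; objective: simpler.


-- ===== PORT A =====
-- one loop iteration of A: decrement n, branch on the digit, add 2**n
-- (the .getD ' ' default is never used on inputs admitted by Pre_findPiece)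
def findPieceA_step (s : List Char) (st : Int × Int × Int) (i : Int) : Int × Int × Int :=
  let m := st.2.2 - 1
  let c := (PySem.List.pyGet? s i).getD ' '
  if c = '2' then (st.1, st.2.1, m)
  else if c = '1' then (st.1 + 2 ^ m.toNat, st.2.1, m)
  else if c = '3' then (st.1, st.2.1 + 2 ^ m.toNat, m)
  else if c = '4' then (st.1 + 2 ^ m.toNat, st.2.1 + 2 ^ m.toNat, m)
  else (st.1, st.2.1, m)

def findPiece (n : Int) (pieceNum : String) : Int × Int :=
  let r := (PySem.List.pyRange 0 n 1).foldl (findPieceA_step pieceNum.toList) (0, 0, n)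
  (r.1, r.2.1)

-- ===== PORT B =====
def findPieceB_step (s : List Char) (p : Int × Int) (i : Int) : Int × Int :=
  let c := (PySem.List.pyGet? s i).getD ' '
  (p.1 * 2 + (if c ∈ ['1', '4'] then 1 else 0),
   p.2 * 2 + (if c ∈ ['3', '4'] then 1 else 0))

def findPiece_alt (n : Int) (pieceNum : String) : Int × Int :=
  (PySem.List.pyRange 0 n 1).foldl (findPieceB_step pieceNum.toList) (0, 0)

-- ===== PRECONDITION & SPEC =====
-- Pre_ excludes n > len(pieceNum), where both Pythons raise IndexError on pieceNum[i].
def Pre_findPiece (n : Int) (pieceNum : String) : Prop := n ≤ (pieceNum.toList.length : Int)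
instance (n : Int) (pieceNum : String) : Decidable (Pre_findPiece n pieceNum) := by unfold Pre_findPiece; infer_instance
def pvWitness_findPiece : Int × String := (2, "14")

def Spec_findPiece (n : Int) (pieceNum : String) (out : Int × Int) : Prop := out = findPiece_alt n pieceNum
instance (n : Int) (pieceNum : String) (out : Int × Int) : Decidable (Spec_findPiece n pieceNum out) := by unfold Spec_findPiece; infer_instance

-- ===== CLAIM (what is proved, stated in full; the proofs are below) =====
def Claim_equal_findPiece : Prop := ∀ (n : Int) (pieceNum : String), Dom_findPiece n pieceNum → Pre_findPiece n pieceNum → Spec_findPiece n pieceNum (findPiece n pieceNum)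

-- ===== LEMMAS AND PROOFS =====

-- A's branch structure computes exactly "add bit * 2^(n-1)" for B's two bits
theorem stepA_eq (s : List Char) (st : Int × Int × Int) (i : Int) :
    findPieceA_step s st i =
      (st.1 + (if ((PySem.List.pyGet? s i).getD ' ') ∈ ['1', '4'] then 1 else 0) * 2 ^ (st.2.2 - 1).toNat,
       st.2.1 + (if ((PySem.List.pyGet? s i).getD ' ') ∈ ['3', '4'] then 1 else 0) * 2 ^ (st.2.2 - 1).toNat,
       st.2.2 - 1) := by
  simp only [findPieceA_step]
  split_ifs with h1 h2 h3 h4 <;> simp_all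

-- loop invariant: after k of the n iterations A's state is B's pair scaled by 2^(n-k)
theorem loop_inv (s : List Char) (n : Int) (k : Nat) (hk : (k : Int) ≤ n) :
    (PySem.List.pyRange 0 (k : Int) 1).foldl (findPieceA_step s) (0, 0, n)
      = ((2 ^ (n - k).toNat * ((PySem.List.pyRange 0 (k : Int) 1).foldl (findPieceB_step s) (0, 0)).1,
          2 ^ (n - k).toNat * ((PySem.List.pyRange 0 (k : Int) 1).foldl (findPieceB_step s) (0, 0)).2,
          n - k) : Int × Int × Int) := by
  induction k with
  | zero => simp
  | succ k ih =>
    have hk' : (k : Int) ≤ n := by push_cast at hk ⊢; omega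
    have hcast : ((k + 1 : Nat) : Int) = (k : Int) + 1 := by push_cast; ring
    rw [hcast, PySem.List.pyRange_one_succ_right (by positivity), List.foldl_append,
        List.foldl_append, ih hk']
    simp only [List.foldl_cons, List.foldl_nil]
    rw [stepA_eq]
    simp only [findPieceB_step]
    have he : (n - (k : Int)).toNat = (n - ((k : Int) + 1)).toNat + 1 := by omega
    have he2 : n - (k : Int) - 1 = n - ((k : Int) + 1) := by ring
    refine Prod.ext ?_ (Prod.ext ?_ ?_) <;> simp only [he, he2, pow_succ] <;> ring

-- ===== VERDICT (by name: the statement is the Claim_ definition above) =====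
theorem findPiece_spec : Claim_equal_findPiece := by
  intro n s _ _
  unfold Spec_findPiece findPiece findPiece_alt
  by_cases h : 0 < n
  · have hn : n = ((n.toNat : Nat) : Int) := by omega
    rw [hn, loop_inv s.toList ((n.toNat : Nat) : Int) n.toNat (le_refl _)]
    simp
  · rw [PySem.List.pyRange_one_eq_nil (by omega)]
    simp
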